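-- pv_equiv track=rewrite | github.com/omarespejel/worldforge | src/worldforge/smoke/run_manifest.py | _looks_sensitive_key
-- ===== SOURCE A (Python) =====
-- def _looks_sensitive_key(name: str) -> bool:
--     normalized = name.lower()
--     return any(
--         marker in normalized
--         for marker in (
--             "api_key",
--             "api_secret",
--             "authorization",
--             "bearer",
--             "credential",
--             "password",
--             "secret",
--             "signature",
--             "signed_url",
--             "token",
--         )
--     )
-- ===== SOURCE B (Python) =====
-- _MARKERS = (
--     "api_key",
--     "api_secret",
--     "authorization",
--     "bearer",
--     "credential",
--     "password",
--     "secret",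
--     "signature",
--     "signed_url",
--     "token",
-- )
--
--
-- def _looks_sensitive_key(name: str) -> bool:
--     # Single left-to-right pass: at each position of the lowercased name,
--     # check whether some marker starts there.
--     s = name.lower()
--     for i in range(len(s)):
--         if any(s.startswith(m, i) for m in _MARKERS):
--             return True
--     return False
-- ===== Notes on version B (the rewrite author's own statement) =====
-- stated objective: alternative
-- what changed: B inverts the traversal: instead of k independent substring scans ('marker in normalized' for each marker), it makes one left-to-right pass over the lowercased name and at each position checks whether some marker starts there (startswith with an offset).
import Mathlib
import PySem

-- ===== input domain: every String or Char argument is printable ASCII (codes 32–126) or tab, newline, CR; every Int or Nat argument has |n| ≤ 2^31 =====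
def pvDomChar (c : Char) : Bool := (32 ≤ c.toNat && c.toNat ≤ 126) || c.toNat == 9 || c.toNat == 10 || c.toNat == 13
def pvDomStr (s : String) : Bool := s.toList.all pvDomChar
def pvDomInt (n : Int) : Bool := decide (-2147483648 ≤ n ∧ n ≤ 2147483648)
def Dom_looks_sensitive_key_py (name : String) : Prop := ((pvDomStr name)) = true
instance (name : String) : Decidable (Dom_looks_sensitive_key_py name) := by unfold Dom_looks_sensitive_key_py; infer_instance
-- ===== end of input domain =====

-- B replaces A's per-marker substring scans by one left-to-right pass over the
-- lowercased name that checks at each position whether some marker starts there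
-- (objective: alternative traversal, same cost class).

-- ===== PORT A =====
-- A: normalized = name.lower(); any(marker in normalized for marker in (...))
def pvMarkers : List String :=
  ["api_key", "api_secret", "authorization", "bearer", "credential",
   "password", "secret", "signature", "signed_url", "token"]

def looks_sensitive_key_py (name : String) : Bool :=
  let normalized := PySem.Str.lower name
  pvMarkers.any (fun marker => PySem.Str.isIn marker normalized)

-- ===== PORT B =====
-- B: the markers as character lists (module-level constant in Source B)
def pvMarkersChars : List (List Char) := pvMarkers.map String.toList

-- B's loop 'for i in range(len(s)): if any(s.startswith(m, i) ...): return True'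
-- as structural recursion over the suffixes of s.
def pvScan : List Char → Bool
  | [] => false
  | c :: t => pvMarkersChars.any (fun m => m.isPrefixOf (c :: t)) || pvScan t

def looks_sensitive_key_py_alt (name : String) : Bool :=
  pvScan (PySem.Chars.lower name.toList)

-- ===== PRECONDITION & SPEC =====
def Spec_looks_sensitive_key_py (name : String) (out : Bool) : Prop := out = looks_sensitive_key_py_alt name
instance (name : String) (out : Bool) : Decidable (Spec_looks_sensitive_key_py name out) := by unfold Spec_looks_sensitive_key_py; infer_instance

-- ===== CLAIM (what is proved, stated in full; the proofs are below) =====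
def Claim_equal_looks_sensitive_key_py : Prop := ∀ (name : String), Dom_looks_sensitive_key_py name → Spec_looks_sensitive_key_py name (looks_sensitive_key_py name)

-- ===== LEMMAS AND PROOFS =====

-- B's position scan finds exactly the marker-infix occurrences.
theorem pvScan_iff (l : List Char) :
    pvScan l = true ↔ ∃ m ∈ pvMarkersChars, m <:+: l := by
  induction l with
  | nil =>
    simp [pvScan]
    decide
  | cons c t ih =>
    simp [pvScan, ih, List.infix_cons_iff, List.IsPrefix]
    constructor
    · rintro (⟨m, hm, h⟩ | ⟨m, hm, h⟩)
      · exact ⟨m, hm, Or.inl h⟩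
      · exact ⟨m, hm, Or.inr h⟩
    · rintro ⟨m, hm, h | h⟩
      · exact Or.inl ⟨m, hm, h⟩
      · exact Or.inr ⟨m, hm, h⟩

-- ===== VERDICT (by name: the statement is the Claim_ definition above) =====
theorem looks_sensitive_key_py_spec : Claim_equal_looks_sensitive_key_py := by
  intro name _
  unfold Spec_looks_sensitive_key_py looks_sensitive_key_py looks_sensitive_key_py_alt
  rw [Bool.eq_iff_iff, pvScan_iff]
  simp [pvMarkersChars, PySem.Str.lower, PySem.Chars.isIn_iff_infix]
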